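-- pv_equiv track=rewrite | github.com/Giftezra/prismadetailer | server/prisma/main/views/availability.py | _range_to_hour_slots
-- ===== SOURCE A (Python) =====
-- def _range_to_hour_slots(start_min, end_min):
--     """
--     Return set of 'HH:00' for business hours 6-20 that overlap [start_min, end_min).
--     UI only has whole-hour slots (06:00, 07:00, ...), so a job at 07:30 must block 07:00.
--     If end_min <= start_min (e.g. duration 0), still block the hour containing start_min.
--     """
--     out = set()
--     if end_min <= start_min:
--         end_min = start_min + 1
--     for h in range(6, 21):
--         slot_start = h * 60
--         slot_end = (h + 1) * 60
--         if start_min < slot_end and end_min > slot_start: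
--             out.add(f"{h:02d}:00")
--     return out
-- ===== SOURCE B (Python) =====
-- def _range_to_hour_slots(start_min, end_min):
--     if end_min <= start_min:
--         end_min = start_min + 1
--     lo = max(start_min // 60, 6)
--     hi = min((end_min - 1) // 60, 20)
--     return {f"{h:02d}:00" for h in range(lo, hi + 1)}
-- ===== Notes on version B (the rewrite author's own statement) =====
-- stated objective: simpler
-- what changed: Replaces the 15-iteration scan over business hours with a closed-form computation of the first and last overlapping hour (floor division, clamped to 6..20) and a direct set comprehension over that range.
import Mathlib
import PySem

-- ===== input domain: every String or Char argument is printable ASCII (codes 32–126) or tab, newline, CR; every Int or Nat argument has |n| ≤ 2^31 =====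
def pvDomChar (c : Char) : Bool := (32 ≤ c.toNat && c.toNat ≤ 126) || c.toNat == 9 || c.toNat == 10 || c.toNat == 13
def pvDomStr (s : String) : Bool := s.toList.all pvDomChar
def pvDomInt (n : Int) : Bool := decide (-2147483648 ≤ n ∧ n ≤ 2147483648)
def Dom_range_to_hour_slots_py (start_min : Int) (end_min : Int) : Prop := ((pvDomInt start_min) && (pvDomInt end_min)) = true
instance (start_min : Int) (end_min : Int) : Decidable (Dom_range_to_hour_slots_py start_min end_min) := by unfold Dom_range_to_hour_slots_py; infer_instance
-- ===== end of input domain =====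

-- B replaces A's fixed 15-iteration scan over business hours by a closed-form
-- computation of the first/last overlapping hour (floor division, clamped to 6..20)
-- and builds the set directly over that range (objective: simpler).

-- f"{h:02d}:00" — exact for every h the loops pass in (0 ≤ h < 100; here 6..20)
def pvFmt (h : Int) : String :=
  String.ofList ((if h < 10 then '0' :: PySem.Int.toChars h else PySem.Int.toChars h) ++ [':', '0', '0'])

-- ===== PORT A =====
def range_to_hour_slots_py (start_min : Int) (end_min : Int) : List String :=
  let end_min := if end_min ≤ start_min then start_min + 1 else end_min
  (PySem.List.pyRange 6 21).foldl
    (fun out h =>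
      let slot_start := h * 60
      let slot_end := (h + 1) * 60
      if start_min < slot_end ∧ end_min > slot_start then PySem.Set.add out (pvFmt h) else out)
    []

-- ===== PORT B =====
def range_to_hour_slots_py_alt (start_min : Int) (end_min : Int) : List String :=
  let end_min := if end_min ≤ start_min then start_min + 1 else end_min
  let lo := max (PySem.Int.floordiv start_min 60) 6
  let hi := min (PySem.Int.floordiv (end_min - 1) 60) 20
  PySem.Set.ofList ((PySem.List.pyRange lo (hi + 1)).map pvFmt)

-- ===== PRECONDITION & SPEC =====
def Spec_range_to_hour_slots_py (start_min : Int) (end_min : Int) (out : List String) : Prop := out = range_to_hour_slots_py_alt start_min end_min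
instance (start_min : Int) (end_min : Int) (out : List String) : Decidable (Spec_range_to_hour_slots_py start_min end_min out) := by unfold Spec_range_to_hour_slots_py; infer_instance

-- ===== CLAIM (what is proved, stated in full; the proofs are below) =====
def Claim_equal_range_to_hour_slots_py : Prop := ∀ (start_min : Int) (end_min : Int), Dom_range_to_hour_slots_py start_min end_min → Spec_range_to_hour_slots_py start_min end_min (range_to_hour_slots_py start_min end_min)

-- ===== LEMMAS AND PROOFS =====

-- The scan over hours 6..20 keeping exactly those with lo ≤ h ≤ hi equals the
-- direct set built over range(lo, hi+1), for every clamped pair of bounds.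
lemma pv_key (lo hi : Int) (h1 : 6 ≤ lo) (h2 : lo ≤ 21) (h3 : 5 ≤ hi) (h4 : hi ≤ 20) :
    (PySem.List.pyRange 6 21).foldl
      (fun out h => if lo ≤ h ∧ h ≤ hi then PySem.Set.add out (pvFmt h) else out) []
    = PySem.Set.ofList ((PySem.List.pyRange lo (hi + 1)).map pvFmt) := by
  interval_cases lo <;> interval_cases hi <;> decide

-- A's overlap test for hour h is exactly start_min // 60 ≤ h ≤ (e-1) // 60.
lemma pv_cond (s e h : Int) :
    (s < (h + 1) * 60 ∧ e > h * 60) ↔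
    (PySem.Int.floordiv s 60 ≤ h ∧ h ≤ PySem.Int.floordiv (e - 1) 60) := by
  have h1 : PySem.Int.floordiv s 60 < h + 1 ↔ s < (h + 1) * 60 :=
    PySem.Int.floordiv_lt_iff_lt_mul (by norm_num)
  have h2 : h ≤ PySem.Int.floordiv (e - 1) 60 ↔ h * 60 ≤ e - 1 :=
    PySem.Int.le_floordiv_iff_mul_le (by norm_num)
  constructor
  · rintro ⟨a, b⟩
    have ha := h1.mpr a
    have hb := h2.mpr (by omega)
    omega
  · rintro ⟨a, b⟩
    have ha := h1.mp (by omega)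
    have hb := h2.mp b
    omega

theorem range_to_hour_slots_py_spec : Claim_equal_range_to_hour_slots_py := by
  intro s e _
  unfold Spec_range_to_hour_slots_py range_to_hour_slots_py range_to_hour_slots_py_alt
  simp only []
  set E : Int := if e ≤ s then s + 1 else e with hE
  have hsE : s < E := by rw [hE]; split_ifs <;> omega
  set L : Int := PySem.Int.floordiv s 60 with hL
  set H : Int := PySem.Int.floordiv (E - 1) 60 with hH
  have hLH : L ≤ H := by
    have h1 : L * 60 ≤ s := (PySem.Int.le_floordiv_iff_mul_le (by norm_num)).mp le_rfl
    exact (PySem.Int.le_floordiv_iff_mul_le (by norm_num)).mpr (by omega)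
  -- clamp the bounds into the business-hour window
  set lo : Int := max (min L 21) 6 with hlo
  set hi : Int := min (max H 5) 20 with hhi
  have hstep : (PySem.List.pyRange 6 21).foldl
      (fun out h => if s < (h + 1) * 60 ∧ E > h * 60 then PySem.Set.add out (pvFmt h) else out) []
      = (PySem.List.pyRange 6 21).foldl
      (fun out h => if lo ≤ h ∧ h ≤ hi then PySem.Set.add out (pvFmt h) else out) [] := by
    apply PySem.List.foldl_congr_mem
    intro acc x hx
    have hb := PySem.List.mem_pyRange_one.mp hx
    have hiff : (s < (x + 1) * 60 ∧ E > x * 60) ↔ (lo ≤ x ∧ x ≤ hi) := by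
      rw [pv_cond s E x, ← hL, ← hH, hlo, hhi]; omega
    by_cases hc : lo ≤ x ∧ x ≤ hi
    · rw [if_pos (hiff.mpr hc), if_pos hc]
    · rw [if_neg (fun hh => hc (hiff.mp hh)), if_neg hc]
  rw [hstep, pv_key lo hi (by omega) (by omega) (by omega) (by omega)]
  -- the clamped range and B's range are the same list
  rcases le_or_gt L 21 with hc1 | hc1
  · rcases le_or_gt 5 H with hc2 | hc2
    · have e1 : lo = max L 6 := by omega
      have e2 : hi = min H 20 := by omega
      rw [e1, e2]
    · -- H < 5: both ranges empty
      have e1 : PySem.List.pyRange lo (hi + 1) = [] := PySem.List.pyRange_one_eq_nil (by omega)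
      have e2 : PySem.List.pyRange (max L 6) (min H 20 + 1) = [] := PySem.List.pyRange_one_eq_nil (by omega)
      rw [e1, e2]
  · -- L > 21: both ranges empty (H ≥ L > 21 so hi = 20 < lo)
    have e1 : PySem.List.pyRange lo (hi + 1) = [] := PySem.List.pyRange_one_eq_nil (by omega)
    have e2 : PySem.List.pyRange (max L 6) (min H 20 + 1) = [] := PySem.List.pyRange_one_eq_nil (by omega)
    rw [e1, e2]
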